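-- pv_equiv track=rewrite | github.com/GeoBot985/OCR_App | src/OCR_App/main.py | _normalize_languages
-- ===== SOURCE A (Python) =====
-- def _normalize_languages(languages):
--     if not languages:
--         return []
--     normalized = set()
--     for lang in languages:
--         for token in str(lang).split(","):
--             cleaned = token.strip().lower()
--             if cleaned:
--                 normalized.add(cleaned)
--     return sorted(normalized)
-- ===== SOURCE B (Python) =====
-- def _normalize_languages(languages):
--     if not languages:
--         return []
--     result = []
--     for lang in languages:
--         for token in str(lang).split(","):
--             cleaned = token.strip().lower()
--             if cleaned:
--                 lo, hi = 0, len(result)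
--                 while lo < hi:
--                     mid = (lo + hi) // 2
--                     if result[mid] < cleaned:
--                         lo = mid + 1
--                     else:
--                         hi = mid
--                 if lo == len(result) or result[lo] != cleaned:
--                     result.insert(lo, cleaned)
--     return result
-- ===== Notes on version B (the rewrite author's own statement) =====
-- stated objective: alternative
-- what changed: B never builds a set and never calls sort: it maintains the answer itself as a strictly increasing duplicate-free list, binary-searching each cleaned token's ordered position and inserting it there unless already present (online binary-insertion sort with dedup), instead of A's set accumulation followed by sorted().
import Mathlib
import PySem

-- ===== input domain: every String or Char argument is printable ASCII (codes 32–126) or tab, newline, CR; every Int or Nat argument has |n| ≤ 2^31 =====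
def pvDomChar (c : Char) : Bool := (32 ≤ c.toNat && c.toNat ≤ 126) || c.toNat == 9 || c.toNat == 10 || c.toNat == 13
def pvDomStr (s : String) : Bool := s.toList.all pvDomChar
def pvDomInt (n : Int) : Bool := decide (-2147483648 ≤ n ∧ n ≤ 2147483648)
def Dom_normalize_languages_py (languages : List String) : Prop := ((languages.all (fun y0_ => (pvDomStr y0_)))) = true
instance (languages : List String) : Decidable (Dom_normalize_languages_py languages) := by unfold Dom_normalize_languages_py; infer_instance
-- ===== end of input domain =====

-- B maintains the answer as a strictly increasing duplicate-free list, binary-searching each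
-- cleaned token's ordered position and inserting it there unless already present
-- (no set, no sort call); objective: alternative.

-- ===== PORT A =====
-- ',' is a non-empty separator, so Python's split never raises; .getD [] only totalizes.
def normalize_languages_py (languages : List String) : List String :=
  if languages = [] then []
  else
    let normalized : PySem.Set String :=
      languages.foldl (fun s lang =>
        ((PySem.Str.split? lang ",").getD []).foldl (fun s token =>
          let cleaned := PySem.Str.lower (PySem.Str.strip token)
          if cleaned ≠ "" then PySem.Set.add s cleaned else s) s) PySem.Set.empty
    PySem.List.sorted normalized (fun x => x)

-- ===== PORT B =====
-- Source B's 'while lo < hi: mid = (lo + hi) // 2; …' loop; result[mid] is in range because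
-- lo ≤ mid < hi ≤ len(result) throughout, so the totalizing getD "" is exact.
def pvBSearch (res : List String) (x : String) (lo hi : Nat) : Nat :=
  if lo < hi then
    let mid := (lo + hi) / 2
    if res.getD mid "" < x then pvBSearch res x (mid + 1) hi else pvBSearch res x lo mid
  else lo
termination_by hi - lo
decreasing_by all_goals omega

-- Source B's 'if lo == len(result) or result[lo] != cleaned: result.insert(lo, cleaned)';
-- the getD "" is only reached when lo < len(result) (short-circuit or), so it is exact;
-- list.insert(lo, x) with 0 ≤ lo ≤ len(result) is List.insertIdx.
def pvInsertToken (res : List String) (x : String) : List String :=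
  let i := pvBSearch res x 0 res.length
  if i = res.length then res ++ [x]
  else if res.getD i "" ≠ x then res.insertIdx i x else res

def normalize_languages_py_alt (languages : List String) : List String :=
  if languages = [] then []
  else
    languages.foldl (fun res lang =>
      ((PySem.Str.split? lang ",").getD []).foldl (fun res token =>
        let cleaned := PySem.Str.lower (PySem.Str.strip token)
        if cleaned ≠ "" then pvInsertToken res cleaned else res) res) []

-- ===== PRECONDITION & SPEC =====
def Spec_normalize_languages_py (languages : List String) (out : List String) : Prop := out = normalize_languages_py_alt languages
instance (languages : List String) (out : List String) : Decidable (Spec_normalize_languages_py languages out) := by unfold Spec_normalize_languages_py; infer_instance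

-- ===== CLAIM (what is proved, stated in full; the proofs are below) =====
def Claim_equal_normalize_languages_py : Prop := ∀ (languages : List String), Dom_normalize_languages_py languages → Spec_normalize_languages_py languages (normalize_languages_py languages)

-- ===== LEMMAS AND PROOFS =====

-- proof-only: the linear lower-bound index (first position whose element is not < x)
def pvLbIdx : List String → String → Nat
  | [], _ => 0
  | y :: ys, x => if y < x then pvLbIdx ys x + 1 else 0

-- proof-only: pvInsertToken with the linear index instead of the binary search
def pvInsertToken' (res : List String) (x : String) : List String :=
  let i := pvLbIdx res x
  if i = res.length then res ++ [x]
  else if res.getD i "" ≠ x then res.insertIdx i x else res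

-- proof-only recursive characterisation of the ordered-insert-unless-present step
def pvInsUniq : List String → String → List String
  | [], x => [x]
  | y :: ys, x => if x < y then x :: y :: ys else if x = y then y :: ys else y :: pvInsUniq ys x

-- index-form strict sortedness
def pvSortedIdx (res : List String) : Prop :=
  ∀ j k, j < k → k < res.length → res.getD j "" < res.getD k ""

theorem pv_pairwise_sortedIdx (res : List String) (h : List.Pairwise (· < ·) res) :
    pvSortedIdx res := by
  intro j k hjk hk
  have hj : j < res.length := hjk.trans hk
  rw [List.getD_eq_getElem res "" hj, List.getD_eq_getElem res "" hk]
  exact List.pairwise_iff_getElem.mp h j k hj hk hjk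

-- the binary search returns an index with the lower-bound properties
theorem pvBSearch_spec (res : List String) (x : String) (hs : pvSortedIdx res) :
    ∀ n lo hi, hi - lo ≤ n → lo ≤ hi → hi ≤ res.length →
      (∀ j, j < lo → res.getD j "" < x) →
      (∀ j, hi ≤ j → j < res.length → ¬ res.getD j "" < x) →
      (pvBSearch res x lo hi ≤ hi
        ∧ (∀ j, j < pvBSearch res x lo hi → res.getD j "" < x)
        ∧ (∀ j, pvBSearch res x lo hi ≤ j → j < res.length → ¬ res.getD j "" < x)) := by
  intro n
  induction n with
  | zero =>
    intro lo hi hn hlohi hhi hlo hup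
    have : lo = hi := by omega
    subst this
    rw [pvBSearch, if_neg (lt_irrefl lo)]
    exact ⟨le_refl lo, hlo, hup⟩
  | succ n ih =>
    intro lo hi hn hlohi hhi hlo hup
    by_cases h : lo < hi
    · rw [pvBSearch, if_pos h]
      simp only []
      by_cases hm : res.getD ((lo + hi) / 2) "" < x
      · rw [if_pos hm]
        have h1 := ih ((lo + hi) / 2 + 1) hi (by omega) (by omega) hhi
          (fun j hj => by
            by_cases hje : j = (lo + hi) / 2
            · exact hje ▸ hm
            · by_cases hjl : j < lo
              · exact hlo j hjl
              · exact (hs j ((lo + hi) / 2) (by omega) (by omega)).trans hm)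
          hup
        exact ⟨h1.1.trans (le_refl hi), h1.2⟩
      · rw [if_neg hm]
        have h1 := ih lo ((lo + hi) / 2) (by omega) (by omega) (by omega) hlo
          (fun j hj hjlen => by
            by_cases hje : j = (lo + hi) / 2
            · exact hje ▸ hm
            · intro hc
              exact hm ((hs ((lo + hi) / 2) j (by omega) hjlen).trans hc))
        exact ⟨h1.1.trans (by omega), h1.2⟩
    · rw [pvBSearch, if_neg h]
      have : lo = hi := by omega
      subst this
      exact ⟨le_refl lo, hlo, hup⟩

-- the linear index has the same two properties (unconditionally)
theorem pvLbIdx_le (res : List String) (x : String) : pvLbIdx res x ≤ res.length := by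
  induction res with
  | nil => simp [pvLbIdx]
  | cons y ys ih =>
    rw [pvLbIdx]
    split_ifs <;> simp [ih]

theorem pvLbIdx_lt (res : List String) (x : String) :
    ∀ j, j < pvLbIdx res x → res.getD j "" < x := by
  induction res with
  | nil => simp [pvLbIdx]
  | cons y ys ih =>
    intro j hj
    rw [pvLbIdx] at hj
    by_cases h : y < x
    · rw [if_pos h] at hj
      cases j with
      | zero => simpa using h
      | succ j => exact ih j (by omega)
    · rw [if_neg h] at hj; omega

theorem pvLbIdx_not_lt (res : List String) (x : String) :
    pvLbIdx res x < res.length → ¬ res.getD (pvLbIdx res x) "" < x := by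
  induction res with
  | nil => simp [pvLbIdx]
  | cons y ys ih =>
    rw [pvLbIdx]
    by_cases h : y < x
    · rw [if_pos h]
      intro hlen
      simpa using ih (by simpa using hlen)
    · rw [if_neg h]
      intro _
      simpa using h

-- two indices with the lower-bound properties coincide
theorem pv_idx_unique (res : List String) (x : String) (i1 i2 : Nat)
    (h1 : i1 ≤ res.length) (h2 : i2 ≤ res.length)
    (a1 : ∀ j, j < i1 → res.getD j "" < x) (b1 : i1 < res.length → ¬ res.getD i1 "" < x)
    (a2 : ∀ j, j < i2 → res.getD j "" < x) (b2 : i2 < res.length → ¬ res.getD i2 "" < x) :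
    i1 = i2 := by
  rcases Nat.lt_trichotomy i1 i2 with h | h | h
  · exact absurd (a2 i1 h) (b1 (by omega))
  · exact h
  · exact absurd (a1 i2 h) (b2 (by omega))

theorem pvBSearch_eq_pvLbIdx (res : List String) (x : String)
    (hsp : List.Pairwise (· < ·) res) :
    pvBSearch res x 0 res.length = pvLbIdx res x := by
  have hs := pv_pairwise_sortedIdx res hsp
  obtain ⟨hle, ha, hb⟩ := pvBSearch_spec res x hs res.length 0 res.length
    (by omega) (by omega) (le_refl _) (fun j hj => absurd hj (Nat.not_lt_zero j))
    (fun j hj hjl => absurd hjl (by omega))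
  exact pv_idx_unique res x _ _ hle (pvLbIdx_le res x) ha (fun h => hb _ (le_refl _) h)
    (pvLbIdx_lt res x) (pvLbIdx_not_lt res x)

theorem pvInsertToken_eq' (res : List String) (x : String)
    (hsp : List.Pairwise (· < ·) res) :
    pvInsertToken res x = pvInsertToken' res x := by
  unfold pvInsertToken pvInsertToken'
  rw [pvBSearch_eq_pvLbIdx res x hsp]

theorem pvInsertToken'_cons_lt (y x : String) (ys : List String) (h : y < x) :
    pvInsertToken' (y :: ys) x = y :: pvInsertToken' ys x := by
  unfold pvInsertToken'
  have hidx : pvLbIdx (y :: ys) x = pvLbIdx ys x + 1 := by rw [pvLbIdx, if_pos h]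
  rw [hidx]
  simp only [List.length_cons, Nat.add_right_cancel_iff, List.getD_cons_succ,
    List.insertIdx_succ_cons, List.cons_append]
  split_ifs <;> rfl

theorem pvInsertToken'_eq (res : List String) (x : String) :
    pvInsertToken' res x = pvInsUniq res x := by
  induction res with
  | nil => simp [pvInsertToken', pvInsUniq, pvLbIdx]
  | cons y ys ih =>
    by_cases h : y < x
    · have hxy : ¬ x < y := asymm h
      have hne : ¬ x = y := fun e => absurd h (e ▸ lt_irrefl x)
      rw [pvInsertToken'_cons_lt y x ys h, ih, pvInsUniq, if_neg hxy, if_neg hne]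
    · have hidx : pvLbIdx (y :: ys) x = 0 := by rw [pvLbIdx, if_neg h]
      unfold pvInsertToken'
      rw [hidx, if_neg (by simp), pvInsUniq]
      simp only [List.getD_cons_zero, List.insertIdx_zero]
      by_cases he : y = x
      · rw [if_neg (by simp [he]), if_neg (he ▸ lt_irrefl x), if_pos he.symm]
      · have hxy : x < y := lt_of_le_of_ne (not_lt.mp h) (Ne.symm he)
        rw [if_pos (Ne.intro he), if_pos hxy]

theorem pvInsertToken_eq (res : List String) (x : String)
    (hsp : List.Pairwise (· < ·) res) :
    pvInsertToken res x = pvInsUniq res x := by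
  rw [pvInsertToken_eq' res x hsp, pvInsertToken'_eq]

theorem pv_mem_insUniq (res : List String) (x a : String) :
    a ∈ pvInsUniq res x ↔ a = x ∨ a ∈ res := by
  induction res with
  | nil => simp [pvInsUniq]
  | cons y ys ih =>
    unfold pvInsUniq
    split_ifs with h1 h2
    · simp
    · subst h2
      simp only [List.mem_cons]
      tauto
    · simp only [List.mem_cons, ih]
      tauto

theorem pv_insUniq_pairwise (res : List String) (x : String)
    (h : List.Pairwise (· < ·) res) :
    List.Pairwise (· < ·) (pvInsUniq res x) := by
  induction res with
  | nil => simp [pvInsUniq]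
  | cons y ys ih =>
    rcases List.pairwise_cons.mp h with ⟨hy, hys⟩
    unfold pvInsUniq
    split_ifs with h1 h2
    · exact List.pairwise_cons.mpr ⟨by
        intro a ha
        rcases List.mem_cons.mp ha with rfl | ha
        · exact h1
        · exact h1.trans (hy a ha), h⟩
    · exact h
    · refine List.pairwise_cons.mpr ⟨?_, ih hys⟩
      intro a ha
      rcases (pv_mem_insUniq ys x a).mp ha with rfl | ha
      · exact lt_of_le_of_ne (not_lt.mp h1) (Ne.symm h2)
      · exact hy a ha

-- A's conditional set-adds over one token list equal set-of the conditional list appends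
-- (g abstracts the cleaning function to keep the terms small).
theorem pv_inner_set (g : String → String) (ts : List String) (acc : List String) :
    ts.foldl (fun s token =>
        if g token ≠ "" then PySem.Set.add s (g token) else s) (PySem.Set.ofList acc)
      = PySem.Set.ofList (ts.foldl (fun a token =>
          if g token ≠ "" then a ++ [g token] else a) acc) := by
  induction ts generalizing acc with
  | nil => simp only [List.foldl_nil]
  | cons t ts ih =>
    simp only [List.foldl_cons]
    split_ifs with h
    · have hadd : PySem.Set.add (PySem.Set.ofList acc) (g t)
          = PySem.Set.ofList (acc ++ [g t]) := by
        rw [PySem.Set.ofList_eq_foldl, PySem.Set.ofList_eq_foldl, List.foldl_append,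
          List.foldl_cons, List.foldl_nil]
      rw [hadd]; exact ih _
    · exact ih acc

-- Same over the whole language list (F abstracts the per-language token list).
theorem pv_outer_set (g : String → String) (F : String → List String)
    (ls : List String) (acc : List String) :
    ls.foldl (fun s lang =>
        (F lang).foldl (fun s token =>
          if g token ≠ "" then PySem.Set.add s (g token) else s) s) (PySem.Set.ofList acc)
      = PySem.Set.ofList (ls.foldl (fun a lang =>
          (F lang).foldl (fun a token =>
            if g token ≠ "" then a ++ [g token] else a) a) acc) := by
  induction ls generalizing acc with
  | nil => simp only [List.foldl_nil]
  | cons l ls ih =>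
    simp only [List.foldl_cons]
    rw [pv_inner_set]; exact ih _

-- B's inner fold keeps the list strictly sorted, with the members of the append fold.
theorem pv_inner_alt (g : String → String) (ts : List String) (res acc : List String)
    (hs : List.Pairwise (· < ·) res) (hm : ∀ a, a ∈ res ↔ a ∈ acc) :
    List.Pairwise (· < ·) (ts.foldl (fun res token =>
        if g token ≠ "" then pvInsertToken res (g token) else res) res)
    ∧ ∀ a, a ∈ (ts.foldl (fun res token =>
        if g token ≠ "" then pvInsertToken res (g token) else res) res)
      ↔ a ∈ (ts.foldl (fun a token =>
          if g token ≠ "" then a ++ [g token] else a) acc) := by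
  induction ts generalizing res acc with
  | nil => exact ⟨hs, hm⟩
  | cons t ts ih =>
    simp only [List.foldl_cons]
    split_ifs with h
    · refine ih (pvInsertToken res (g t)) (acc ++ [g t]) ?_ ?_
      · rw [pvInsertToken_eq res (g t) hs]; exact pv_insUniq_pairwise res _ hs
      · intro a
        rw [pvInsertToken_eq res (g t) hs, pv_mem_insUniq]
        simp only [List.mem_append, List.mem_singleton, hm a]
        tauto
    · exact ih res acc hs hm

-- Same invariant over the whole language list.
theorem pv_outer_alt (g : String → String) (F : String → List String)
    (ls : List String) (res acc : List String)
    (hs : List.Pairwise (· < ·) res) (hm : ∀ a, a ∈ res ↔ a ∈ acc) :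
    List.Pairwise (· < ·) (ls.foldl (fun res lang =>
        (F lang).foldl (fun res token =>
          if g token ≠ "" then pvInsertToken res (g token) else res) res) res)
    ∧ ∀ a, a ∈ (ls.foldl (fun res lang =>
        (F lang).foldl (fun res token =>
          if g token ≠ "" then pvInsertToken res (g token) else res) res) res)
      ↔ a ∈ (ls.foldl (fun a lang =>
          (F lang).foldl (fun a token =>
            if g token ≠ "" then a ++ [g token] else a) a) acc) := by
  induction ls generalizing res acc with
  | nil => exact ⟨hs, hm⟩
  | cons l ls ih =>
    simp only [List.foldl_cons]
    obtain ⟨h1, h2⟩ := pv_inner_alt g (F l) res acc hs hm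
    exact ih _ _ h1 h2

set_option maxHeartbeats 1000000 in
theorem normalize_languages_py_spec : Claim_equal_normalize_languages_py := by
  intro languages _
  unfold Spec_normalize_languages_py normalize_languages_py normalize_languages_py_alt
  by_cases hnil : languages = []
  · subst hnil; rfl
  · rw [if_neg hnil, if_neg hnil]
    show PySem.List.sorted
        (languages.foldl (fun s lang =>
          ((PySem.Str.split? lang ",").getD []).foldl (fun s token =>
            if PySem.Str.lower (PySem.Str.strip token) ≠ ""
            then PySem.Set.add s (PySem.Str.lower (PySem.Str.strip token)) else s) s)
          PySem.Set.empty) (fun x => x)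
      = languages.foldl (fun res lang =>
          ((PySem.Str.split? lang ",").getD []).foldl (fun res token =>
            if PySem.Str.lower (PySem.Str.strip token) ≠ ""
            then pvInsertToken res (PySem.Str.lower (PySem.Str.strip token)) else res) res) []
    have hset := pv_outer_set (fun token => PySem.Str.lower (PySem.Str.strip token))
      (fun lang => (PySem.Str.split? lang ",").getD []) languages []
    rw [show (PySem.Set.ofList ([] : List String)) = PySem.Set.empty from rfl] at hset
    rw [hset]
    obtain ⟨hlt, hmem⟩ := pv_outer_alt (fun token => PySem.Str.lower (PySem.Str.strip token))
      (fun lang => (PySem.Str.split? lang ",").getD []) languages [] [] (by simp) (fun a => Iff.rfl)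
    apply PySem.List.sorted_eq_of_perm_of_pairwise_lt
    · rw [List.perm_ext_iff_of_nodup (List.Pairwise.imp ne_of_lt hlt) (PySem.Set.nodup_ofList _)]
      intro a
      rw [hmem a, PySem.Set.mem_ofList]
    · simpa using hlt
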